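-- pv_equiv track=rewrite | github.com/thiagofernandes1987-create/APEX | algorithms/uco/universal_code_optimizer_v4.py | _classify_keywords
-- ===== SOURCE A (Python) =====
-- from typing import Any, Callable, Dict, Iterable, List, Optional, Set, Tuple, Union
--
-- def _classify_keywords(kw_set: Set[str]) -> str:
--     """
--     GAP-B03 FIX / C-07 FIX: núcleo de classificação por conjunto de keywords.
--     Usa uma priority_chain explícita em vez de 5 for-loops individuais.
--     CC reduzida: o 'for' único sobre a chain substitui os 5 loops separados.
--
--     Prioridade: branch > loop_header > break > continue > terminal > stmt
--     """
--     # Cada entrada: (kind_a_retornar, frozenset_de_keywords)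
--     # Ordem é a prioridade — a primeira match vence.
--     _PRIORITY_CHAIN = (
--         ("branch",      frozenset({"if","elif","else","switch","case","default",
--                                    "try","except","catch","finally","with","match"})),
--         ("loop_header", frozenset({"for","while","do"})),
--         ("break",       frozenset({"break"})),
--         ("continue",    frozenset({"continue"})),
--         ("terminal",    frozenset({"return","raise","throw","goto"})),
--     )
--     for kind, kw_group in _PRIORITY_CHAIN:
--         if kw_set & kw_group:
--             return kind
--     return "stmt"
-- ===== SOURCE B (Python) =====
-- # Different decomposition: one keyword->(rank, kind) dict built once; a single pass
-- # over kw_set keeps the minimum rank instead of scanning the priority chain.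
-- _CHAIN = (
--     ("branch", ("if", "elif", "else", "switch", "case", "default",
--                 "try", "except", "catch", "finally", "with", "match")),
--     ("loop_header", ("for", "while", "do")),
--     ("break", ("break",)),
--     ("continue", ("continue",)),
--     ("terminal", ("return", "raise", "throw", "goto")),
-- )
-- _RANK = {kw: (i, kind) for i, (kind, kws) in enumerate(_CHAIN) for kw in kws}
--
--
-- def _classify_keywords(kw_set):
--     best = None
--     for kw in kw_set:
--         r = _RANK.get(kw)
--         if r is not None and (best is None or r[0] < best[0]):
--             best = r
--     return "stmt" if best is None else best[1]
-- ===== Notes on version B (the rewrite author's own statement) =====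
-- stated objective: alternative
-- what changed: Replaces the scan over the 5-entry priority chain with set intersections by a single pass over kw_set that looks each keyword up in a precomputed keyword->(rank,kind) dict and keeps the minimum rank.
import Mathlib
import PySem

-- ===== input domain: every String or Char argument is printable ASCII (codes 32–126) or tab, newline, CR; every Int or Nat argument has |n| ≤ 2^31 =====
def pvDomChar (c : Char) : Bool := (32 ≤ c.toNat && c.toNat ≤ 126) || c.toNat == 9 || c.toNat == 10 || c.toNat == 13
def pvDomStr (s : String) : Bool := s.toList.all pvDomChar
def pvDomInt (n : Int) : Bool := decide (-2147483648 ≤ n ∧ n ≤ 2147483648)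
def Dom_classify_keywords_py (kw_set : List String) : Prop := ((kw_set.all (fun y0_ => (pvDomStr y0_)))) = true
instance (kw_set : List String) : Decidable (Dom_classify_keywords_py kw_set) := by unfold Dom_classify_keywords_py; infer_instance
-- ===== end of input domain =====

-- B replaces A's scan of the fixed priority chain (set intersection per entry) by one pass
-- over kw_set keeping the minimum rank from a precomputed keyword->(rank,kind) dict; same cost class, different decomposition.

-- ===== PORT A =====
-- the five keyword groups of A's _PRIORITY_CHAIN (frozensets of distinct literals)
def pvG0 : List String := ["if","elif","else","switch","case","default","try","except","catch","finally","with","match"]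
def pvG1 : List String := ["for","while","do"]
def pvG2 : List String := ["break"]
def pvG3 : List String := ["continue"]
def pvG4 : List String := ["return","raise","throw","goto"]

-- 'for kind, kw_group in _PRIORITY_CHAIN: if kw_set & kw_group: return kind'
-- (truthiness of the set intersection = some element of kw_set lies in kw_group)
def pvChainLoopA (kw_set : List String) : List (String × List String) → String
  | [] => "stmt"
  | (kind, g) :: rest =>
      if kw_set.any (fun w => g.contains w) then kind else pvChainLoopA kw_set rest

def classify_keywords_py (kw_set : List String) : String :=
  pvChainLoopA kw_set
    [("branch", pvG0), ("loop_header", pvG1), ("break", pvG2), ("continue", pvG3), ("terminal", pvG4)]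

-- ===== PORT B =====
-- _RANK: the module-level dict comprehension, written out in its insertion order
def pvRankB : PySem.Dict String (Int × String) :=
  PySem.Dict.ofList
    [("if",(0,"branch")),("elif",(0,"branch")),("else",(0,"branch")),("switch",(0,"branch")),
     ("case",(0,"branch")),("default",(0,"branch")),("try",(0,"branch")),("except",(0,"branch")),
     ("catch",(0,"branch")),("finally",(0,"branch")),("with",(0,"branch")),("match",(0,"branch")),
     ("for",(1,"loop_header")),("while",(1,"loop_header")),("do",(1,"loop_header")),
     ("break",(2,"break")),("continue",(3,"continue")),
     ("return",(4,"terminal")),("raise",(4,"terminal")),("throw",(4,"terminal")),("goto",(4,"terminal"))]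

-- 'for kw in kw_set: r = _RANK.get(kw); if r is not None and (best is None or r[0] < best[0]): best = r'
def pvBestLoopB (best : Option (Int × String)) : List String → Option (Int × String)
  | [] => best
  | kw :: rest =>
      pvBestLoopB
        (match PySem.Dict.get? pvRankB kw, best with
         | none, b => b
         | some p, none => some p
         | some p, some b => if p.1 < b.1 then some p else some b) rest

def classify_keywords_py_alt (kw_set : List String) : String :=
  match pvBestLoopB none kw_set with
  | none => "stmt"
  | some b => b.2

-- ===== PRECONDITION & SPEC =====
def Spec_classify_keywords_py (kw_set : List String) (out : String) : Prop := out = classify_keywords_py_alt kw_set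
instance (kw_set : List String) (out : String) : Decidable (Spec_classify_keywords_py kw_set out) := by unfold Spec_classify_keywords_py; infer_instance

-- ===== CLAIM (what is proved, stated in full; the proofs are below) =====
def Claim_equal_classify_keywords_py : Prop := ∀ (kw_set : List String), Dom_classify_keywords_py kw_set → Spec_classify_keywords_py kw_set (classify_keywords_py kw_set)

-- ===== LEMMAS AND PROOFS =====

-- left-biased minimum-rank merge: exactly B's update step, as a binary operation
def pvOmin (b r : Option (Int × String)) : Option (Int × String) :=
  match r, b with
  | none, b => b
  | some p, none => some p
  | some p, some b => if p.1 < b.1 then some p else some b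

lemma pvOmin_none_left (x : Option (Int × String)) : pvOmin none x = x := by
  cases x <;> rfl

lemma pvOmin_assoc (a b c : Option (Int × String)) :
    pvOmin (pvOmin a b) c = pvOmin a (pvOmin b c) := by
  rcases a with _ | a <;> rcases b with _ | b <;> rcases c with _ | c <;>
    simp only [pvOmin] <;> split_ifs <;> simp only [pvOmin] <;> split_ifs <;>
    first | rfl | omega

lemma pvBestLoopB_merge (l : List String) (b : Option (Int × String)) :
    pvBestLoopB b l = pvOmin b (pvBestLoopB none l) := by
  induction l generalizing b with
  | nil => rfl
  | cons kw t ih =>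
      show pvBestLoopB (pvOmin b (PySem.Dict.get? pvRankB kw)) t = _
      rw [ih, show pvBestLoopB none (kw :: t)
            = pvBestLoopB (pvOmin none (PySem.Dict.get? pvRankB kw)) t from rfl,
          ih (pvOmin none (PySem.Dict.get? pvRankB kw)), pvOmin_none_left, pvOmin_assoc]

-- A's chain result computed as an optional (rank, kind)
def pvAny (l g : List String) : Bool := l.any (fun w => g.contains w)

def pvChainF (l : List String) : Option (Int × String) :=
  if pvAny l pvG0 then some (0, "branch")
  else if pvAny l pvG1 then some (1, "loop_header")
  else if pvAny l pvG2 then some (2, "break")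
  else if pvAny l pvG3 then some (3, "continue")
  else if pvAny l pvG4 then some (4, "terminal")
  else none

lemma A_char (l : List String) :
    classify_keywords_py l = (match pvChainF l with | none => "stmt" | some b => b.2) := by
  simp only [classify_keywords_py, pvChainLoopA, pvChainF, pvAny]
  split_ifs <;> rfl

set_option maxHeartbeats 1000000 in
lemma B_char (l : List String) : pvBestLoopB none l = pvChainF l := by
  induction l with
  | nil => rfl
  | cons kw t ih =>
    rw [show pvBestLoopB none (kw :: t)
          = pvBestLoopB (pvOmin none (PySem.Dict.get? pvRankB kw)) t from rfl,
        pvBestLoopB_merge, pvOmin_none_left, ih]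
    by_cases h0 : kw = "if"
    · subst h0
      rw [show PySem.Dict.get? pvRankB "if" = some ((0:Int),"branch") from rfl]
      simp [pvChainF, pvAny, pvG0, pvG1, pvG2, pvG3, pvG4]
      split_ifs <;> simp_all [pvOmin]
    by_cases h1 : kw = "elif"
    · subst h1
      rw [show PySem.Dict.get? pvRankB "elif" = some ((0:Int),"branch") from rfl]
      simp [pvChainF, pvAny, pvG0, pvG1, pvG2, pvG3, pvG4]
      split_ifs <;> simp_all [pvOmin]
    by_cases h2 : kw = "else"
    · subst h2
      rw [show PySem.Dict.get? pvRankB "else" = some ((0:Int),"branch") from rfl]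
      simp [pvChainF, pvAny, pvG0, pvG1, pvG2, pvG3, pvG4]
      split_ifs <;> simp_all [pvOmin]
    by_cases h3 : kw = "switch"
    · subst h3
      rw [show PySem.Dict.get? pvRankB "switch" = some ((0:Int),"branch") from rfl]
      simp [pvChainF, pvAny, pvG0, pvG1, pvG2, pvG3, pvG4]
      split_ifs <;> simp_all [pvOmin]
    by_cases h4 : kw = "case"
    · subst h4
      rw [show PySem.Dict.get? pvRankB "case" = some ((0:Int),"branch") from rfl]
      simp [pvChainF, pvAny, pvG0, pvG1, pvG2, pvG3, pvG4]
      split_ifs <;> simp_all [pvOmin]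
    by_cases h5 : kw = "default"
    · subst h5
      rw [show PySem.Dict.get? pvRankB "default" = some ((0:Int),"branch") from rfl]
      simp [pvChainF, pvAny, pvG0, pvG1, pvG2, pvG3, pvG4]
      split_ifs <;> simp_all [pvOmin]
    by_cases h6 : kw = "try"
    · subst h6
      rw [show PySem.Dict.get? pvRankB "try" = some ((0:Int),"branch") from rfl]
      simp [pvChainF, pvAny, pvG0, pvG1, pvG2, pvG3, pvG4]
      split_ifs <;> simp_all [pvOmin]
    by_cases h7 : kw = "except"
    · subst h7
      rw [show PySem.Dict.get? pvRankB "except" = some ((0:Int),"branch") from rfl]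
      simp [pvChainF, pvAny, pvG0, pvG1, pvG2, pvG3, pvG4]
      split_ifs <;> simp_all [pvOmin]
    by_cases h8 : kw = "catch"
    · subst h8
      rw [show PySem.Dict.get? pvRankB "catch" = some ((0:Int),"branch") from rfl]
      simp [pvChainF, pvAny, pvG0, pvG1, pvG2, pvG3, pvG4]
      split_ifs <;> simp_all [pvOmin]
    by_cases h9 : kw = "finally"
    · subst h9
      rw [show PySem.Dict.get? pvRankB "finally" = some ((0:Int),"branch") from rfl]
      simp [pvChainF, pvAny, pvG0, pvG1, pvG2, pvG3, pvG4]
      split_ifs <;> simp_all [pvOmin]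
    by_cases h10 : kw = "with"
    · subst h10
      rw [show PySem.Dict.get? pvRankB "with" = some ((0:Int),"branch") from rfl]
      simp [pvChainF, pvAny, pvG0, pvG1, pvG2, pvG3, pvG4]
      split_ifs <;> simp_all [pvOmin]
    by_cases h11 : kw = "match"
    · subst h11
      rw [show PySem.Dict.get? pvRankB "match" = some ((0:Int),"branch") from rfl]
      simp [pvChainF, pvAny, pvG0, pvG1, pvG2, pvG3, pvG4]
      split_ifs <;> simp_all [pvOmin]
    by_cases h12 : kw = "for"
    · subst h12
      rw [show PySem.Dict.get? pvRankB "for" = some ((1:Int),"loop_header") from rfl]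
      simp [pvChainF, pvAny, pvG0, pvG1, pvG2, pvG3, pvG4]
      split_ifs <;> simp_all [pvOmin]
    by_cases h13 : kw = "while"
    · subst h13
      rw [show PySem.Dict.get? pvRankB "while" = some ((1:Int),"loop_header") from rfl]
      simp [pvChainF, pvAny, pvG0, pvG1, pvG2, pvG3, pvG4]
      split_ifs <;> simp_all [pvOmin]
    by_cases h14 : kw = "do"
    · subst h14
      rw [show PySem.Dict.get? pvRankB "do" = some ((1:Int),"loop_header") from rfl]
      simp [pvChainF, pvAny, pvG0, pvG1, pvG2, pvG3, pvG4]
      split_ifs <;> simp_all [pvOmin]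
    by_cases h15 : kw = "break"
    · subst h15
      rw [show PySem.Dict.get? pvRankB "break" = some ((2:Int),"break") from rfl]
      simp [pvChainF, pvAny, pvG0, pvG1, pvG2, pvG3, pvG4]
      split_ifs <;> simp_all [pvOmin]
    by_cases h16 : kw = "continue"
    · subst h16
      rw [show PySem.Dict.get? pvRankB "continue" = some ((3:Int),"continue") from rfl]
      simp [pvChainF, pvAny, pvG0, pvG1, pvG2, pvG3, pvG4]
      split_ifs <;> simp_all [pvOmin]
    by_cases h17 : kw = "return"
    · subst h17
      rw [show PySem.Dict.get? pvRankB "return" = some ((4:Int),"terminal") from rfl]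
      simp [pvChainF, pvAny, pvG0, pvG1, pvG2, pvG3, pvG4]
      split_ifs <;> simp_all [pvOmin]
    by_cases h18 : kw = "raise"
    · subst h18
      rw [show PySem.Dict.get? pvRankB "raise" = some ((4:Int),"terminal") from rfl]
      simp [pvChainF, pvAny, pvG0, pvG1, pvG2, pvG3, pvG4]
      split_ifs <;> simp_all [pvOmin]
    by_cases h19 : kw = "throw"
    · subst h19
      rw [show PySem.Dict.get? pvRankB "throw" = some ((4:Int),"terminal") from rfl]
      simp [pvChainF, pvAny, pvG0, pvG1, pvG2, pvG3, pvG4]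
      split_ifs <;> simp_all [pvOmin]
    by_cases h20 : kw = "goto"
    · subst h20
      rw [show PySem.Dict.get? pvRankB "goto" = some ((4:Int),"terminal") from rfl]
      simp [pvChainF, pvAny, pvG0, pvG1, pvG2, pvG3, pvG4]
      split_ifs <;> simp_all [pvOmin]
    have hg : PySem.Dict.get? pvRankB kw = none := by
      rw [show pvRankB = PySem.Dict.mk [("if",((0:Int),"branch")),("elif",(0,"branch")),("else",(0,"branch")),("switch",(0,"branch")),("case",(0,"branch")),("default",(0,"branch")),("try",(0,"branch")),("except",(0,"branch")),("catch",(0,"branch")),("finally",(0,"branch")),("with",(0,"branch")),("match",(0,"branch")),("for",(1,"loop_header")),("while",(1,"loop_header")),("do",(1,"loop_header")),("break",(2,"break")),("continue",(3,"continue")),("return",(4,"terminal")),("raise",(4,"terminal")),("throw",(4,"terminal")),("goto",(4,"terminal"))] from rfl]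
      simp [PySem.Dict.get?, Ne.symm h0, Ne.symm h1, Ne.symm h2, Ne.symm h3, Ne.symm h4, Ne.symm h5, Ne.symm h6, Ne.symm h7, Ne.symm h8, Ne.symm h9, Ne.symm h10, Ne.symm h11, Ne.symm h12, Ne.symm h13, Ne.symm h14, Ne.symm h15, Ne.symm h16, Ne.symm h17, Ne.symm h18, Ne.symm h19, Ne.symm h20]
    rw [hg, pvOmin_none_left]
    simp [pvChainF, pvAny, pvG0, pvG1, pvG2, pvG3, pvG4, h0, h1, h2, h3, h4, h5, h6, h7, h8, h9, h10, h11, h12, h13, h14, h15, h16, h17, h18, h19, h20]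

-- ===== VERDICT (by name: the statement is the Claim_ definition above) =====
theorem classify_keywords_py_spec : Claim_equal_classify_keywords_py := by
  intro l _
  show classify_keywords_py l = classify_keywords_py_alt l
  rw [A_char, classify_keywords_py_alt, B_char]
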